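-- pv_equiv track=rewrite | github.com/18hnasir/CODE112 | hnasir4_218_P4.py | find_land
-- ===== SOURCE A (Python) =====
-- def find_land(map, r, c, dir):
-- 	total = 0
-- 	land = False #to see if it is land
-- 	if map[r][c] > 0:
-- 		return 0
-- 	if dir == "N": #c is the same
-- 		if r == 0:
-- 			return None
-- 		for i in range(len(map)):
-- 			r -= 1
-- 			if map[r][c] >= 0:
-- 				total += 1
-- 				if map[r][c] > 0:
-- 					land = True
-- 					break
-- 	elif dir == "NE": # r is lowered and c is increased
-- 		if r == 0 and c == len(map[0]) - 1:
-- 			return None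
-- 		for i in range(len(map) - 2):
-- 			r -= 1
-- 			c += 1
-- 			if map[r][c] >= 0:
-- 				total += 1
-- 				if map[r][c] > 0:
-- 					land = True
-- 					break
-- 	elif dir == "E":#r is the same
-- 		if c == len(map[0]) - 1:
-- 			return None
-- 		for i in range(len(map[r])):
-- 			c += 1
-- 			if map[r][c] >= 0:
-- 				total += 1
-- 				if map[r][c] > 0:
-- 					land = True
-- 					break
-- 	elif dir == "SE": #r is increased and c is decreased
-- 		if r == len(map) - 1 and c == len(map[0]) - 1:
-- 			return None
-- 		for i in range(len(map) - 2):
-- 			r += 1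
-- 			c -= 1
-- 			if map[r][c] >= 0:
-- 				total += 1
-- 				if map[r][c] > 0:
-- 					land = True
-- 					break
-- 	elif dir == "S": #c is the same
-- 		if r == len(map) - 1:
-- 			return None
-- 		for i in range(len(map)):
-- 			r += 1
-- 			if map[r][c] >= 0:
-- 				total += 1
-- 				if map[r][c] > 0:
-- 					land = True
-- 					break
-- 	elif dir == "SW": #r is increased and c is decreased
-- 		if r == len(map) - 1 and c == 0:
-- 			return None
-- 		for i in range(len(map) - 2):
-- 			r += 1
-- 			c -= 1
-- 			if map[r][c] >= 0:
-- 				total += 1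
-- 				if map[r][c] > 0:
-- 					land = True
-- 					break
-- 	elif dir == "W": #r is the same
-- 		if c == 0:
-- 			return None
-- 		for i in range(len(map[r])):
-- 			c -= 1
-- 			if map[r][c] >= 0:
-- 				total += 1
-- 				if map[r][c] > 0:
-- 					land = True
-- 					break
-- 	elif dir == "NW": #r is decreased and c is increased
-- 		if r == 0 and c == 0:
-- 			return None
-- 		for i in range(len(map) - 2):
-- 			r -= 1
-- 			c -= 1
-- 			if map[r][c] >= 0:
-- 				total += 1
-- 				if map[r][c] > 0:
-- 					land = True
-- 					break
-- 	if land == True: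
-- 		return total
-- 	else:
-- 		return None
-- ===== SOURCE B (Python) =====
-- def find_land(map, r, c, dir):
--     if map[r][c] > 0:
--         return 0
--     table = {
--         "N":  (-1, 0, len(map), r == 0),
--         "NE": (-1, 1, len(map) - 2, r == 0 and c == len(map[0]) - 1),
--         "E":  (0, 1, len(map[r]), c == len(map[0]) - 1),
--         "SE": (1, -1, len(map) - 2, r == len(map) - 1 and c == len(map[0]) - 1),
--         "S":  (1, 0, len(map), r == len(map) - 1),
--         "SW": (1, -1, len(map) - 2, r == len(map) - 1 and c == 0),
--         "W":  (0, -1, len(map[r]), c == 0),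
--         "NW": (-1, -1, len(map) - 2, r == 0 and c == 0),
--     }
--     if dir not in table:
--         return None
--     dr, dc, n, blocked = table[dir]
--     if blocked:
--         return None
--     # phase 1: locate the first land cell along the ray
--     k = None
--     rr, cc = r, c
--     for i in range(n):
--         rr += dr
--         cc += dc
--         if map[rr][cc] > 0:
--             k = i
--             break
--     if k is None:
--         return None
--     # phase 2: count the sea-level-or-land cells of that prefix by direct coordinates
--     return sum(1 for i in range(k + 1) if map[r + dr * (i + 1)][c + dc * (i + 1)] >= 0)
-- ===== Notes on version B (the rewrite author's own statement) =====
-- stated objective: alternative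
-- what changed: Replaces A's eight copy-pasted accumulate-and-break walks by a direction dispatch table feeding two staged passes: phase 1 only locates the index of the first land cell along the ray, phase 2 counts the sea-level-or-land cells of that prefix by direct coordinate formula, with no running accumulator intertwined with the break.
import Mathlib
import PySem

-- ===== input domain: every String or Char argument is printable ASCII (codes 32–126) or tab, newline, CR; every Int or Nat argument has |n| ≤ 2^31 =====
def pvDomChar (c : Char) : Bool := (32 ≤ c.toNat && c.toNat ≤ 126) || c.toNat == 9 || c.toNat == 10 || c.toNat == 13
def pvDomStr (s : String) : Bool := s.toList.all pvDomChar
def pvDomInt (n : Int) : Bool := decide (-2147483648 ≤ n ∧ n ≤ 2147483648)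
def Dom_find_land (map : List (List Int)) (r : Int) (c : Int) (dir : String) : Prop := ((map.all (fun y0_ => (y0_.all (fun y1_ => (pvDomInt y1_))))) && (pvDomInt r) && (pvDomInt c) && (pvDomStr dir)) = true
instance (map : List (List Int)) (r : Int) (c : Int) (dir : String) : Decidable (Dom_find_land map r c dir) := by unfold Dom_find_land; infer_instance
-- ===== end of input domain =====

-- B replaces A's eight copy-pasted accumulate-and-break walks by a dispatch table feeding two
-- staged passes: locate the first land cell, then count the nonnegative prefix cells by direct
-- coordinate formula (objective: alternative decomposition, same cost).

-- shared Python-exact 2-D indexing: map[r][c] with negative-index wrap; none = IndexError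
def pvGet2 (m : List (List Int)) (r c : Int) : Option Int :=
  (PySem.List.pyGet? m r).bind (fun row => PySem.List.pyGet? row c)

-- len(map[0]) / len(map[r]) as A/B read them (map is nonempty whenever these are reached,
-- because map[r][c] has already been read successfully)
def pvRow0Len (m : List (List Int)) : Int := (((PySem.List.pyGet? m 0).getD []).length : Int)
def pvRowLenN (m : List (List Int)) (r : Int) : Nat := ((PySem.List.pyGet? m r).getD []).length

-- ===== PORT A =====
-- one loop per direction branch, exactly as A writes them out; none = fell off / IndexError (excluded by Pre_)
def pvLoopN (m : List (List Int)) (r c total : Int) : Nat → Option Int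
  | 0 => none
  | Nat.succ k =>
    let r' := r - 1
    match pvGet2 m r' c with
    | none => none
    | some v => if v ≥ 0 then (if v > 0 then some (total + 1) else pvLoopN m r' c (total + 1) k)
                else pvLoopN m r' c total k

def pvLoopNE (m : List (List Int)) (r c total : Int) : Nat → Option Int
  | 0 => none
  | Nat.succ k =>
    let r' := r - 1
    let c' := c + 1
    match pvGet2 m r' c' with
    | none => none
    | some v => if v ≥ 0 then (if v > 0 then some (total + 1) else pvLoopNE m r' c' (total + 1) k)
                else pvLoopNE m r' c' total k

def pvLoopE (m : List (List Int)) (r c total : Int) : Nat → Option Int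
  | 0 => none
  | Nat.succ k =>
    let c' := c + 1
    match pvGet2 m r c' with
    | none => none
    | some v => if v ≥ 0 then (if v > 0 then some (total + 1) else pvLoopE m r c' (total + 1) k)
                else pvLoopE m r c' total k

def pvLoopSE (m : List (List Int)) (r c total : Int) : Nat → Option Int
  | 0 => none
  | Nat.succ k =>
    let r' := r + 1
    let c' := c - 1
    match pvGet2 m r' c' with
    | none => none
    | some v => if v ≥ 0 then (if v > 0 then some (total + 1) else pvLoopSE m r' c' (total + 1) k)
                else pvLoopSE m r' c' total k

def pvLoopS (m : List (List Int)) (r c total : Int) : Nat → Option Int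
  | 0 => none
  | Nat.succ k =>
    let r' := r + 1
    match pvGet2 m r' c with
    | none => none
    | some v => if v ≥ 0 then (if v > 0 then some (total + 1) else pvLoopS m r' c (total + 1) k)
                else pvLoopS m r' c total k

def pvLoopSW (m : List (List Int)) (r c total : Int) : Nat → Option Int
  | 0 => none
  | Nat.succ k =>
    let r' := r + 1
    let c' := c - 1
    match pvGet2 m r' c' with
    | none => none
    | some v => if v ≥ 0 then (if v > 0 then some (total + 1) else pvLoopSW m r' c' (total + 1) k)
                else pvLoopSW m r' c' total k

def pvLoopW (m : List (List Int)) (r c total : Int) : Nat → Option Int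
  | 0 => none
  | Nat.succ k =>
    let c' := c - 1
    match pvGet2 m r c' with
    | none => none
    | some v => if v ≥ 0 then (if v > 0 then some (total + 1) else pvLoopW m r c' (total + 1) k)
                else pvLoopW m r c' total k

def pvLoopNW (m : List (List Int)) (r c total : Int) : Nat → Option Int
  | 0 => none
  | Nat.succ k =>
    let r' := r - 1
    let c' := c - 1
    match pvGet2 m r' c' with
    | none => none
    | some v => if v ≥ 0 then (if v > 0 then some (total + 1) else pvLoopNW m r' c' (total + 1) k)
                else pvLoopNW m r' c' total k

def find_land (map : List (List Int)) (r : Int) (c : Int) (dir : String) : Option Int :=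
  match pvGet2 map r c with
  | none => none   -- IndexError in Python (excluded by Pre_)
  | some v0 =>
    if v0 > 0 then some 0
    else if dir = "N" then
      if r = 0 then none else pvLoopN map r c 0 map.length
    else if dir = "NE" then
      if r = 0 ∧ c = pvRow0Len map - 1 then none else pvLoopNE map r c 0 (map.length - 2)
    else if dir = "E" then
      if c = pvRow0Len map - 1 then none else pvLoopE map r c 0 (pvRowLenN map r)
    else if dir = "SE" then
      if r = (map.length : Int) - 1 ∧ c = pvRow0Len map - 1 then none else pvLoopSE map r c 0 (map.length - 2)
    else if dir = "S" then
      if r = (map.length : Int) - 1 then none else pvLoopS map r c 0 map.length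
    else if dir = "SW" then
      if r = (map.length : Int) - 1 ∧ c = 0 then none else pvLoopSW map r c 0 (map.length - 2)
    else if dir = "W" then
      if c = 0 then none else pvLoopW map r c 0 (pvRowLenN map r)
    else if dir = "NW" then
      if r = 0 ∧ c = 0 then none else pvLoopNW map r c 0 (map.length - 2)
    else none   -- land stays False

-- ===== PORT B =====
-- the dispatch table of Source B: direction ↦ (dr, dc, iteration count, boundary guard)
def pvTable (map : List (List Int)) (r c : Int) : List (String × (Int × Int × Nat × Bool)) :=
  [("N",  (-1, 0,  map.length,      r == 0)),
   ("NE", (-1, 1,  map.length - 2,  r == 0 && c == pvRow0Len map - 1)),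
   ("E",  (0, 1,   pvRowLenN map r, c == pvRow0Len map - 1)),
   ("SE", (1, -1,  map.length - 2,  r == (map.length : Int) - 1 && c == pvRow0Len map - 1)),
   ("S",  (1, 0,   map.length,      r == (map.length : Int) - 1)),
   ("SW", (1, -1,  map.length - 2,  r == (map.length : Int) - 1 && c == 0)),
   ("W",  (0, -1,  pvRowLenN map r, c == 0)),
   ("NW", (-1, -1, map.length - 2,  r == 0 && c == 0))]

-- phase 1 of Source B: walk the ray to the index of the first land cell (none = not found, or IndexError)
def pvFindK (m : List (List Int)) (dr dc : Int) : Int → Int → Nat → Nat → Option Nat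
  | _, _, _, 0 => none
  | rr, cc, i, Nat.succ f =>
    let rr' := rr + dr
    let cc' := cc + dc
    match pvGet2 m rr' cc' with
    | none => none   -- IndexError in Python (excluded by Pre_)
    | some v => if v > 0 then some i else pvFindK m dr dc rr' cc' (i + 1) f

-- phase 2 of Source B: sum(1 for i in range(k+1) if map[r+dr*(i+1)][c+dc*(i+1)] >= 0)
-- (these re-reads are always in range in Python since phase 1 read them; getD 0 is unreachable)
def pvCount (m : List (List Int)) (dr dc r c : Int) (k : Nat) : Int :=
  (((List.range (k + 1)).filter
      (fun i => decide (0 ≤ (pvGet2 m (r + dr * ((i : Int) + 1)) (c + dc * ((i : Int) + 1))).getD 0))).length : Int)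

def find_land_alt (map : List (List Int)) (r : Int) (c : Int) (dir : String) : Option Int :=
  match pvGet2 map r c with
  | none => none   -- IndexError in Python (excluded by Pre_)
  | some v0 =>
    if v0 > 0 then some 0
    else
      match (pvTable map r c).lookup dir with
      | none => none
      | some (dr, dc, n, blocked) =>
        if blocked then none
        else
          match pvFindK map dr dc r c 0 n with
          | none => none
          | some k => some (pvCount map dr dc r c k)

-- ===== PRECONDITION & SPEC =====
-- Pre_ excludes exactly the inputs where Python A raises IndexError: an out-of-range initial
-- (r, c), or a walk that steps off the grid before it either breaks on land or exhausts its count.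
-- step j of the loop reads in range AND continues (cell value ≤ 0, i.e. no break)
def pvCellOk (m : List (List Int)) (dr dc r c : Int) (j : Nat) : Bool :=
  match pvGet2 m (r + dr * ((j : Int) + 1)) (c + dc * ((j : Int) + 1)) with
  | some v => decide (v ≤ 0)
  | none => false

-- the direction's delta and count when a loop actually runs (known direction, guard not blocked)
def pvPreParams (m : List (List Int)) (r c : Int) (dir : String) : Option ((Int × Int) × Nat) :=
  if dir = "N" then (if r = 0 then none else some ((-1, 0), m.length))
  else if dir = "NE" then (if r = 0 ∧ c = pvRow0Len m - 1 then none else some ((-1, 1), m.length - 2))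
  else if dir = "E" then (if c = pvRow0Len m - 1 then none else some ((0, 1), pvRowLenN m r))
  else if dir = "SE" then (if r = (m.length : Int) - 1 ∧ c = pvRow0Len m - 1 then none else some ((1, -1), m.length - 2))
  else if dir = "S" then (if r = (m.length : Int) - 1 then none else some ((1, 0), m.length))
  else if dir = "SW" then (if r = (m.length : Int) - 1 ∧ c = 0 then none else some ((1, -1), m.length - 2))
  else if dir = "W" then (if c = 0 then none else some ((0, -1), pvRowLenN m r))
  else if dir = "NW" then (if r = 0 ∧ c = 0 then none else some ((-1, -1), m.length - 2))
  else none

-- every loop step that is actually executed (all earlier steps read in range and did not break) reads in range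
def pvPreLoopOk (m : List (List Int)) (r c : Int) (dir : String) : Bool :=
  if 0 < (pvGet2 m r c).getD 0 then true
  else
    match pvPreParams m r c dir with
    | none => true
    | some ((dr, dc), n) =>
      (List.range n).all (fun i =>
        !((List.range i).all (pvCellOk m dr dc r c)) ||
        (pvGet2 m (r + dr * ((i : Int) + 1)) (c + dc * ((i : Int) + 1))).isSome)

def Pre_find_land (map : List (List Int)) (r : Int) (c : Int) (dir : String) : Prop :=
  (pvGet2 map r c).isSome = true ∧ pvPreLoopOk map r c dir = true
instance (map : List (List Int)) (r : Int) (c : Int) (dir : String) : Decidable (Pre_find_land map r c dir) := by unfold Pre_find_land; infer_instance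

def pvWitness_find_land : List (List Int) × Int × Int × String := ([[0, 1], [0, 0]], 0, 0, "E")

def Spec_find_land (map : List (List Int)) (r : Int) (c : Int) (dir : String) (out : Option Int) : Prop := out = find_land_alt map r c dir
instance (map : List (List Int)) (r : Int) (c : Int) (dir : String) (out : Option Int) : Decidable (Spec_find_land map r c dir out) := by unfold Spec_find_land; infer_instance

-- ===== CLAIM (what is proved, stated in full; the proofs are below) =====
def Claim_equal_find_land : Prop := ∀ (map : List (List Int)) (r : Int) (c : Int) (dir : String), Dom_find_land map r c dir → Pre_find_land map r c dir → Spec_find_land map r c dir (find_land map r c dir)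

-- ===== LEMMAS AND PROOFS =====

-- A's generic walk (each hand-written pvLoop* is an instance of it; proved below)
def pvStep (m : List (List Int)) (dr dc r c total : Int) : Nat → Option Int
  | 0 => none
  | Nat.succ k =>
    let r' := r + dr
    let c' := c + dc
    match pvGet2 m r' c' with
    | none => none
    | some v => if v ≥ 0 then (if v > 0 then some (total + 1) else pvStep m dr dc r' c' (total + 1) k)
                else pvStep m dr dc r' c' total k

-- prefix count starting at index i (pvCount is the i = 0 case)
def pvCntFrom (m : List (List Int)) (dr dc r c : Int) (i k : Nat) : Int :=
  (((List.range' i (k + 1 - i)).filter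
      (fun j => decide (0 ≤ (pvGet2 m (r + dr * ((j : Int) + 1)) (c + dc * ((j : Int) + 1))).getD 0))).length : Int)

lemma pvCntFrom_zero (m : List (List Int)) (dr dc r c : Int) (k : Nat) :
    pvCntFrom m dr dc r c 0 k = pvCount m dr dc r c k := by
  simp [pvCntFrom, pvCount, List.range_eq_range']

lemma pvCntFrom_succ (m : List (List Int)) (dr dc r c : Int) {i k : Nat} (h : i ≤ k) :
    pvCntFrom m dr dc r c i k =
      (if 0 ≤ (pvGet2 m (r + dr * ((i : Int) + 1)) (c + dc * ((i : Int) + 1))).getD 0 then 1 else 0)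
        + pvCntFrom m dr dc r c (i + 1) k := by
  have h1 : k + 1 - i = (k - i) + 1 := by omega
  have h2 : k + 1 - (i + 1) = k - i := by omega
  rw [pvCntFrom, pvCntFrom, h1, h2, List.range'_succ]
  by_cases hp : 0 ≤ (pvGet2 m (r + dr * ((i : Int) + 1)) (c + dc * ((i : Int) + 1))).getD 0 <;>
    simp [hp] <;> push_cast <;> ring

lemma pvFindK_ge (m : List (List Int)) (dr dc : Int) :
    ∀ (f : Nat) (rr cc : Int) (i k : Nat), pvFindK m dr dc rr cc i f = some k → i ≤ k := by
  intro f
  induction f with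
  | zero => intro rr cc i k h; simp [pvFindK] at h
  | succ f ih =>
    intro rr cc i k h
    simp only [pvFindK] at h
    cases hg : pvGet2 m (rr + dr) (cc + dc) with
    | none => rw [hg] at h; exact absurd h (by simp)
    | some v =>
      rw [hg] at h
      by_cases hv : v > 0
      · simp [hv] at h; omega
      · simp [hv] at h; have := ih _ _ _ _ h; omega

-- A's walk = B's two phases (find index of first land, then count the nonnegative prefix)
lemma pvStep_eq_phases (m : List (List Int)) (dr dc r c : Int) :
    ∀ (f i : Nat) (t : Int),
      pvStep m dr dc (r + dr * (i : Int)) (c + dc * (i : Int)) t f =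
        (match pvFindK m dr dc (r + dr * (i : Int)) (c + dc * (i : Int)) i f with
         | none => none
         | some k => some (t + pvCntFrom m dr dc r c i k)) := by
  intro f
  induction f with
  | zero => intro i t; rfl
  | succ f ih =>
    intro i t
    have er : r + dr * (i : Int) + dr = r + dr * ((i : Int) + 1) := by ring
    have ec : c + dc * (i : Int) + dc = c + dc * ((i : Int) + 1) := by ring
    have er' : r + dr * ((i : Int) + 1) = r + dr * (((i + 1 : Nat) : Int)) := by push_cast; ring
    have ec' : c + dc * ((i : Int) + 1) = c + dc * (((i + 1 : Nat) : Int)) := by push_cast; ring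
    simp only [pvStep, pvFindK, er, ec]
    cases hg : pvGet2 m (r + dr * ((i : Int) + 1)) (c + dc * ((i : Int) + 1)) with
    | none => rfl
    | some v =>
      by_cases hv : v > 0
      · have hv0 : v ≥ 0 := le_of_lt hv
        simp only [hv, hv0, if_true]
        have : pvCntFrom m dr dc r c i i = 1 := by
          rw [pvCntFrom]
          have : i + 1 - i = 1 := by omega
          rw [this]
          simp [List.range'_succ, hg, le_of_lt hv]
        rw [this]
      · have hsplit : ∀ k, i ≤ k →
            t + pvCntFrom m dr dc r c i k =
              (if v ≥ 0 then t + 1 else t) + pvCntFrom m dr dc r c (i + 1) k := by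
          intro k hk
          rw [pvCntFrom_succ m dr dc r c hk, hg]
          by_cases hv0 : v ≥ 0 <;> simp [hv0] <;> ring
        by_cases hv0 : v ≥ 0
        · simp only [hv0, if_true, hv, if_false]
          rw [er', ec', ih (i + 1) (t + 1)]
          cases hf : pvFindK m dr dc (r + dr * (((i + 1 : Nat) : Int))) (c + dc * (((i + 1 : Nat) : Int))) (i + 1) f with
          | none => rfl
          | some k =>
            have hik : i ≤ k := by have := pvFindK_ge m dr dc f _ _ _ _ hf; omega
            simp only []
            rw [hsplit k hik]
            simp [hv0]
        · simp only [hv0, if_false, hv, if_false]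
          rw [er', ec', ih (i + 1) t]
          cases hf : pvFindK m dr dc (r + dr * (((i + 1 : Nat) : Int))) (c + dc * (((i + 1 : Nat) : Int))) (i + 1) f with
          | none => rfl
          | some k =>
            have hik : i ≤ k := by have := pvFindK_ge m dr dc f _ _ _ _ hf; omega
            simp only []
            rw [hsplit k hik]
            simp [hv0]

lemma pvStep_eq_BFindCount (m : List (List Int)) (dr dc r c : Int) (n : Nat) :
    pvStep m dr dc r c 0 n =
      (match pvFindK m dr dc r c 0 n with
       | none => none
       | some k => some (pvCount m dr dc r c k)) := by
  have e0r : r = r + dr * ((0 : Nat) : Int) := by push_cast; ring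
  have e0c : c = c + dc * ((0 : Nat) : Int) := by push_cast; ring
  rw [e0r, e0c, pvStep_eq_phases m dr dc r c n 0 0]
  cases pvFindK m dr dc (r + dr * ((0 : Nat) : Int)) (c + dc * ((0 : Nat) : Int)) 0 n with
  | none => rfl
  | some k => simp [pvCntFrom_zero]

-- each of A's eight hand-written loops is the generic walk at that direction's delta
lemma pvLoopN_eq (m : List (List Int)) (k : Nat) : ∀ (r c t : Int), pvLoopN m r c t k = pvStep m (-1) 0 r c t k := by
  induction k with
  | zero => intro r c t; rfl
  | succ k ih =>
    intro r c t
    simp only [pvLoopN, pvStep]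
    rw [show r + (-1) = r - 1 by ring, show c + 0 = c by ring]
    cases pvGet2 m (r - 1) c with
    | none => rfl
    | some v => by_cases hv : v ≥ 0 <;> by_cases hv2 : v > 0 <;> simp [hv, hv2, ih]

lemma pvLoopNE_eq (m : List (List Int)) (k : Nat) : ∀ (r c t : Int), pvLoopNE m r c t k = pvStep m (-1) 1 r c t k := by
  induction k with
  | zero => intro r c t; rfl
  | succ k ih =>
    intro r c t
    simp only [pvLoopNE, pvStep]
    rw [show r + (-1) = r - 1 by ring]
    cases pvGet2 m (r - 1) (c + 1) with
    | none => rfl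
    | some v => by_cases hv : v ≥ 0 <;> by_cases hv2 : v > 0 <;> simp [hv, hv2, ih]

lemma pvLoopE_eq (m : List (List Int)) (k : Nat) : ∀ (r c t : Int), pvLoopE m r c t k = pvStep m 0 1 r c t k := by
  induction k with
  | zero => intro r c t; rfl
  | succ k ih =>
    intro r c t
    simp only [pvLoopE, pvStep]
    rw [show r + 0 = r by ring]
    cases pvGet2 m r (c + 1) with
    | none => rfl
    | some v => by_cases hv : v ≥ 0 <;> by_cases hv2 : v > 0 <;> simp [hv, hv2, ih]

lemma pvLoopSE_eq (m : List (List Int)) (k : Nat) : ∀ (r c t : Int), pvLoopSE m r c t k = pvStep m 1 (-1) r c t k := by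
  induction k with
  | zero => intro r c t; rfl
  | succ k ih =>
    intro r c t
    simp only [pvLoopSE, pvStep]
    rw [show c + (-1) = c - 1 by ring]
    cases pvGet2 m (r + 1) (c - 1) with
    | none => rfl
    | some v => by_cases hv : v ≥ 0 <;> by_cases hv2 : v > 0 <;> simp [hv, hv2, ih]

lemma pvLoopS_eq (m : List (List Int)) (k : Nat) : ∀ (r c t : Int), pvLoopS m r c t k = pvStep m 1 0 r c t k := by
  induction k with
  | zero => intro r c t; rfl
  | succ k ih =>
    intro r c t
    simp only [pvLoopS, pvStep]
    rw [show c + 0 = c by ring]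
    cases pvGet2 m (r + 1) c with
    | none => rfl
    | some v => by_cases hv : v ≥ 0 <;> by_cases hv2 : v > 0 <;> simp [hv, hv2, ih]

lemma pvLoopSW_eq (m : List (List Int)) (k : Nat) : ∀ (r c t : Int), pvLoopSW m r c t k = pvStep m 1 (-1) r c t k := by
  induction k with
  | zero => intro r c t; rfl
  | succ k ih =>
    intro r c t
    simp only [pvLoopSW, pvStep]
    rw [show c + (-1) = c - 1 by ring]
    cases pvGet2 m (r + 1) (c - 1) with
    | none => rfl
    | some v => by_cases hv : v ≥ 0 <;> by_cases hv2 : v > 0 <;> simp [hv, hv2, ih]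

lemma pvLoopW_eq (m : List (List Int)) (k : Nat) : ∀ (r c t : Int), pvLoopW m r c t k = pvStep m 0 (-1) r c t k := by
  induction k with
  | zero => intro r c t; rfl
  | succ k ih =>
    intro r c t
    simp only [pvLoopW, pvStep]
    rw [show r + 0 = r by ring, show c + (-1) = c - 1 by ring]
    cases pvGet2 m r (c - 1) with
    | none => rfl
    | some v => by_cases hv : v ≥ 0 <;> by_cases hv2 : v > 0 <;> simp [hv, hv2, ih]

lemma pvLoopNW_eq (m : List (List Int)) (k : Nat) : ∀ (r c t : Int), pvLoopNW m r c t k = pvStep m (-1) (-1) r c t k := by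
  induction k with
  | zero => intro r c t; rfl
  | succ k ih =>
    intro r c t
    simp only [pvLoopNW, pvStep]
    rw [show r + (-1) = r - 1 by ring, show c + (-1) = c - 1 by ring]
    cases pvGet2 m (r - 1) (c - 1) with
    | none => rfl
    | some v => by_cases hv : v ≥ 0 <;> by_cases hv2 : v > 0 <;> simp [hv, hv2, ih]

-- ===== VERDICT (by name: the statement is the Claim_ definition above) =====
theorem find_land_spec : Claim_equal_find_land := by
  intro map r c dir _hdom _hpre
  unfold Spec_find_land find_land find_land_alt
  cases pvGet2 map r c with
  | none => rfl
  | some v0 =>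
    by_cases hv0 : v0 > 0
    · simp [hv0]
    · simp only [hv0, if_false]
      by_cases h1 : dir = "N"
      · subst h1
        simp [pvTable, beq_iff_eq]
        split_ifs <;> simp_all [pvLoopN_eq, pvStep_eq_BFindCount]
      · by_cases h2 : dir = "NE"
        · subst h2
          simp [pvTable, List.lookup, beq_iff_eq]
          split_ifs <;> simp_all [pvLoopNE_eq, pvStep_eq_BFindCount]
        · by_cases h3 : dir = "E"
          · subst h3
            simp [pvTable, List.lookup, beq_iff_eq]
            split_ifs <;> simp_all [pvLoopE_eq, pvStep_eq_BFindCount]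
          · by_cases h4 : dir = "SE"
            · subst h4
              simp [pvTable, List.lookup, beq_iff_eq]
              split_ifs <;> simp_all [pvLoopSE_eq, pvStep_eq_BFindCount]
            · by_cases h5 : dir = "S"
              · subst h5
                simp [pvTable, List.lookup, beq_iff_eq]
                split_ifs <;> simp_all [pvLoopS_eq, pvStep_eq_BFindCount]
              · by_cases h6 : dir = "SW"
                · subst h6
                  simp [pvTable, List.lookup, beq_iff_eq]
                  split_ifs <;> simp_all [pvLoopSW_eq, pvStep_eq_BFindCount]
                · by_cases h7 : dir = "W"
                  · subst h7
                    simp [pvTable, List.lookup, beq_iff_eq]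
                    split_ifs <;> simp_all [pvLoopW_eq, pvStep_eq_BFindCount]
                  · by_cases h8 : dir = "NW"
                    · subst h8
                      simp [pvTable, List.lookup, beq_iff_eq]
                      split_ifs <;> simp_all [pvLoopNW_eq, pvStep_eq_BFindCount]
                    · have e1 : (dir == "N") = false := beq_eq_false_iff_ne.mpr h1
                      have e2 : (dir == "NE") = false := beq_eq_false_iff_ne.mpr h2
                      have e3 : (dir == "E") = false := beq_eq_false_iff_ne.mpr h3
                      have e4 : (dir == "SE") = false := beq_eq_false_iff_ne.mpr h4
                      have e5 : (dir == "S") = false := beq_eq_false_iff_ne.mpr h5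
                      have e6 : (dir == "SW") = false := beq_eq_false_iff_ne.mpr h6
                      have e7 : (dir == "W") = false := beq_eq_false_iff_ne.mpr h7
                      have e8 : (dir == "NW") = false := beq_eq_false_iff_ne.mpr h8
                      simp [pvTable, List.lookup, e1, e2, e3, e4, e5, e6, e7, e8, h1, h2, h3, h4, h5, h6, h7, h8]
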